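-- pv_equiv track=rewrite | github.com/alessiopierdominici/osm-test | utils/general_utils.py | prepare_tags
-- ===== SOURCE A (Python) =====
-- def prepare_tags(unique_tags):
--     # TODO think of better way to prepare tags
--     processed_tags = []
--     for tag in unique_tags:
--         tag = tag.replace("{", "")
--         tag = tag.replace("}", "")
--         tag = tag.replace("'", "")
--         tag = tag.replace("=", "")
--         tag = tag.replace(":", "")
--         tag = tag.replace(",", "")
--         processed_tags.append(tag)
--
--     return processed_tags
-- ===== SOURCE B (Python) =====
-- def prepare_tags(unique_tags):
--     forbidden = {'{', '}', "'", '=', ':', ','}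
--     return [''.join(c for c in tag if c not in forbidden) for tag in unique_tags]
-- ===== Notes on version B (the rewrite author's own statement) =====
-- stated objective: simpler
-- what changed: Replaces six sequential whole-string .replace passes per tag with one character-level filtering pass against a set of forbidden characters, built as a list comprehension.
import Mathlib
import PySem

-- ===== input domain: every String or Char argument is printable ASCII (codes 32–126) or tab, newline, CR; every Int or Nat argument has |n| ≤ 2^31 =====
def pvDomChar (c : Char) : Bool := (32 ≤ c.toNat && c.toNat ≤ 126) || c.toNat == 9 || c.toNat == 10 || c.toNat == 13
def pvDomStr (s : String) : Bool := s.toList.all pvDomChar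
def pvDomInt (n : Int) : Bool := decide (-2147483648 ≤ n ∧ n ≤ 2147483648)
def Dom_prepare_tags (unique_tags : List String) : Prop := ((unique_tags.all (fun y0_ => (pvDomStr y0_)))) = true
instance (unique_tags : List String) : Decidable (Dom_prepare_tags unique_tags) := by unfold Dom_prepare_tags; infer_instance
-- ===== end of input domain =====

-- B replaces six sequential whole-string replace passes per tag with one character-level
-- filtering pass against a set of forbidden characters (objective: simpler).

-- ===== PORT A =====
def prepare_tags (unique_tags : List String) : List String :=
  unique_tags.foldl (fun processed_tags tag =>
    let tag := PySem.Str.replace tag "{" ""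
    let tag := PySem.Str.replace tag "}" ""
    let tag := PySem.Str.replace tag "'" ""
    let tag := PySem.Str.replace tag "=" ""
    let tag := PySem.Str.replace tag ":" ""
    let tag := PySem.Str.replace tag "," ""
    processed_tags ++ [tag]) []

-- ===== PORT B =====
def pvForbidden : List Char := ['{', '}', '\'', '=', ':', ',']

def prepare_tags_alt (unique_tags : List String) : List String :=
  unique_tags.map (fun tag => String.ofList (tag.toList.filter (fun c => !pvForbidden.contains c)))

-- ===== PRECONDITION & SPEC =====
def Spec_prepare_tags (unique_tags : List String) (out : List String) : Prop := out = prepare_tags_alt unique_tags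
instance (unique_tags : List String) (out : List String) : Decidable (Spec_prepare_tags unique_tags out) := by unfold Spec_prepare_tags; infer_instance

-- ===== CLAIM (what is proved, stated in full; the proofs are below) =====
def Claim_equal_prepare_tags : Prop := ∀ (unique_tags : List String), Dom_prepare_tags unique_tags → Spec_prepare_tags unique_tags (prepare_tags unique_tags)

-- ===== LEMMAS AND PROOFS =====

theorem replace_go_single (c : Char) : ∀ (fuel : Nat) (l acc : List Char), l.length ≤ fuel →
    PySem.Chars.replace.go [c] [] fuel l acc = acc.reverse ++ l.filter (fun x => x != c) := by
  intro fuel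
  induction fuel with
  | zero =>
    intro l acc h
    have : l = [] := List.length_eq_zero_iff.mp (Nat.le_zero.mp h)
    subst this
    simp [PySem.Chars.replace.go]
  | succ n ih =>
    intro l acc h
    cases l with
    | nil => simp [PySem.Chars.replace.go]
    | cons x t =>
      simp only [PySem.Chars.replace.go]
      by_cases hx : x = c
      · subst hx
        have hpre : List.isPrefixOf [x] (x :: t) = true := by
          simp [List.isPrefixOf]
        rw [if_pos hpre]
        have ht : t.length ≤ n := by simpa using h
        have hdrop : List.drop (List.length [x]) (x :: t) = t := rfl
        rw [hdrop, ih _ _ ht]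
        simp
      · have hpre : List.isPrefixOf [c] (x :: t) = false := by
          simp [List.isPrefixOf]
          exact fun hh => (hx hh.symm).elim
        rw [if_neg (by simp [hpre])]
        have ht : t.length ≤ n := by simpa using h
        rw [ih _ _ ht]
        simp [hx]

theorem replace_single (s : List Char) (c : Char) :
    PySem.Chars.replace s [c] [] = s.filter (fun x => x != c) := by
  rw [PySem.Chars.replace]
  simp only [List.isEmpty_cons, if_false, Bool.false_eq_true]
  exact replace_go_single c s.length s [] (le_refl _)

theorem foldl_append_map {α β : Type} (f : α → β) :
    ∀ (l : List α) (acc : List β), l.foldl (fun r t => r ++ [f t]) acc = acc ++ l.map f := by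
  intro l
  induction l with
  | nil => intro acc; simp
  | cons x t ih => intro acc; simp [ih]

def cleanA (tag : String) : String :=
  PySem.Str.replace (PySem.Str.replace (PySem.Str.replace (PySem.Str.replace
    (PySem.Str.replace (PySem.Str.replace tag "{" "") "}" "") "'" "") "=" "") ":" "") "," ""

theorem tag_eq (tag : String) :
    cleanA tag = String.ofList (tag.toList.filter (fun c => !pvForbidden.contains c)) := by
  unfold cleanA
  simp only [PySem.Str.replace, String.toList_ofList]
  congr 1
  simp only [show "{".toList = ['{'] from rfl, show "}".toList = ['}'] from rfl,
    show "'".toList = ['\''] from rfl, show "=".toList = ['='] from rfl,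
    show ":".toList = [':'] from rfl, show ",".toList = [','] from rfl,
    show "".toList = ([] : List Char) from rfl]
  rw [replace_single, replace_single, replace_single, replace_single, replace_single,
      replace_single]
  simp only [List.filter_filter]
  apply List.filter_congr
  intro x _
  simp only [pvForbidden, List.contains_cons, List.contains_nil, Bool.or_false,
    Bool.not_or, bne]
  ac_rfl

theorem prepare_tags_spec : Claim_equal_prepare_tags := by
  intro unique_tags _
  unfold Spec_prepare_tags prepare_tags_alt
  show List.foldl (fun r t => r ++ [cleanA t]) [] unique_tags = _
  rw [foldl_append_map]
  simp only [List.nil_append]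
  exact List.map_congr_left (fun tag _ => tag_eq tag)
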